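-- pv_equiv track=rewrite | github.com/hboonewilson/CS | BooneWilsonFinalProject.py | decodeStringFixed
-- ===== SOURCE A (Python) =====
-- def decodeStringFixed(binaryString, myCharacters, myCode):
--     #create return string
--     retstr = ''
--     #create an eval string
--     st_eval = ''
--     #iterate binaryString for value
--     for num in binaryString:
--         #add num to st_eval
--         st_eval += num
--         #iterate myCode for index
--         for i in range(0, len(myCode)):
--             #if st_eval is equal to this index in myCode
--             if st_eval == myCode[i]:
--                 #add corresponding index in myCharacters to retstr
--                 retstr += myCharacters[i]
--                 st_eval = ''
--                 break
--     return retstr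
-- ===== SOURCE B (Python) =====
-- def decodeStringFixed(binaryString, myCharacters, myCode):
--     # Build a first-occurrence-wins lookup table once, then decode by
--     # recursing on the remaining string: at each point take the shortest
--     # prefix of the rest that is a known code.
--     table = {}
--     for code, ch in zip(myCode, myCharacters):
--         if code not in table:
--             table[code] = ch
--     pieces = []
--     rest = binaryString
--     while rest:
--         for l in range(1, len(rest) + 1):
--             if rest[:l] in table:
--                 pieces.append(table[rest[:l]])
--                 rest = rest[l:]
--                 break
--         else:
--             break
--     return ''.join(pieces)
-- ===== Notes on version B (the rewrite author's own statement) =====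
-- stated objective: faster
-- what changed: B builds a first-occurrence-wins dict of codes once and decodes by recursing on the remaining string (shortest known prefix at each step), instead of A's per-character accumulator with an inner index scan over the code list.
-- outside the precondition, e.g. on decodeStringFixed('01', ['x'], ['01', '1']): A returns 'x', B returns 'x'
import Mathlib
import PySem

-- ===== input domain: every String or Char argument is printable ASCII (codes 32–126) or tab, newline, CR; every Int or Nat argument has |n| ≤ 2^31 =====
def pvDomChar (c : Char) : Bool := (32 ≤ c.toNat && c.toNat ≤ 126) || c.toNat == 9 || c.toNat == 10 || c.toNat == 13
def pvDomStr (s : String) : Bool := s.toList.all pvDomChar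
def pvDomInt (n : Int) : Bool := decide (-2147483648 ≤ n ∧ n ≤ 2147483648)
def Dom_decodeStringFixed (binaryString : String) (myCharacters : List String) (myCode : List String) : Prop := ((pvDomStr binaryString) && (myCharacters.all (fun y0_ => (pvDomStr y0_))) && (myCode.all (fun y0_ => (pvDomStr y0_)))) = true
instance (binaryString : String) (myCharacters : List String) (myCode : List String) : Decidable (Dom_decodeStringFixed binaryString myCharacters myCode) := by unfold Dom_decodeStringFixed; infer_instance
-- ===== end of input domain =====

-- B builds a first-occurrence-wins code→character dictionary once and decodes by recursing on the
-- remaining string (emitting the shortest known prefix at each step), replacing A's per-character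
-- accumulator with its inner index scan over the code list; faster when the code list is long.


-- ===== PORT A =====
-- inner `for i in range(0, len(myCode)): if st_eval == myCode[i]: … break` — returns the break index
def aScan (stEval : List Char) (myCode : List String) (i : Nat) : Option Nat :=
  if h : i < myCode.length then
    if myCode[i].toList = stEval then some i
    else aScan stEval myCode (i + 1)
  else none
termination_by myCode.length - i

-- outer `for num in binaryString` loop with state (retstr, st_eval)
def aRun (myCharacters myCode : List String) : List Char → List Char → List Char → List Char
  | [], retstr, _ => retstr
  | num :: rest, retstr, stEval =>
    match aScan (stEval ++ [num]) myCode 0 with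
    | some i => aRun myCharacters myCode rest (retstr ++ (myCharacters.getD i "").toList) []
    | none => aRun myCharacters myCode rest retstr (stEval ++ [num])

def decodeStringFixed (binaryString : String) (myCharacters : List String) (myCode : List String) : String :=
  String.ofList (aRun myCharacters myCode binaryString.toList [] [])

-- ===== PORT B =====
-- `for code, ch in zip(myCode, myCharacters): if code not in table: table[code] = ch`
def bBuild (pairs : List (String × String)) : PySem.Dict String String :=
  pairs.foldl (fun table p => if table.contains p.1 then table else table.insert p.1 p.2) PySem.Dict.empty

-- `for l in range(1, len(rest)+1): if rest[:l] in table: …` — returns (table[rest[:l]], l) of the first hit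
def bFind (table : PySem.Dict String String) (rest : List Char) (l : Nat) : Option (String × Nat) :=
  if l ≤ rest.length then
    match table.get? (String.ofList (rest.take l)) with
    | some ch => some (ch, l)
    | none => bFind table rest (l + 1)
  else none
termination_by rest.length + 1 - l

-- needed for the termination of bDecode below
theorem bFind_le (table : PySem.Dict String String) (rest : List Char) :
    ∀ l p, bFind table rest l = some p → l ≤ p.2 ∧ p.2 ≤ rest.length := by
  intro l p hp
  fun_induction bFind table rest l with
  | case1 l h ch hg => cases hp; exact ⟨le_refl _, h⟩
  | case2 l h hg ih => have := ih hp; omega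
  | case3 l h => simp at hp

-- the `while rest:` loop, collecting the decoded pieces
def bDecode (table : PySem.Dict String String) : List Char → List String
  | [] => []
  | c :: rest' =>
    match hf2 : bFind table (c :: rest') 1 with
    | some p => p.1 :: bDecode table ((c :: rest').drop p.2)
    | none => []
termination_by rest => rest.length
decreasing_by
  have := bFind_le table (c :: rest') 1 p hf2
  simp only [List.length_drop, List.length_cons]
  omega

def decodeStringFixed_alt (binaryString : String) (myCharacters : List String) (myCode : List String) : String :=
  String.join (bDecode (bBuild (myCode.zip myCharacters)) binaryString.toList)

-- ===== PRECONDITION & SPEC =====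
-- Pre_ excludes inputs where some code beyond the end of myCharacters is a nonempty substring of
-- binaryString: if such a code is ever matched, A raises IndexError on myCharacters[i]; when such a
-- code happens never to be matched A still returns (and agrees with B) — those inputs are excluded
-- too because whether A raises there depends on the run, not on a closed-form shape of the input.
def Pre_decodeStringFixed (binaryString : String) (myCharacters : List String) (myCode : List String) : Prop :=
  ∀ c ∈ myCode.drop myCharacters.length, c.toList = [] ∨ ¬ (c.toList <:+: binaryString.toList)
instance (binaryString : String) (myCharacters : List String) (myCode : List String) : Decidable (Pre_decodeStringFixed binaryString myCharacters myCode) := by unfold Pre_decodeStringFixed; infer_instance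
def pvWitness_decodeStringFixed : String × List String × List String := ("0101", ["a", "b"], ["01", "1"])

def Spec_decodeStringFixed (binaryString : String) (myCharacters : List String) (myCode : List String) (out : String) : Prop := out = decodeStringFixed_alt binaryString myCharacters myCode
instance (binaryString : String) (myCharacters : List String) (myCode : List String) (out : String) : Decidable (Spec_decodeStringFixed binaryString myCharacters myCode out) := by unfold Spec_decodeStringFixed; infer_instance

-- ===== CLAIM (what is proved, stated in full; the proofs are below) =====
def Claim_equal_decodeStringFixed : Prop := ∀ (binaryString : String) (myCharacters : List String) (myCode : List String), Dom_decodeStringFixed binaryString myCharacters myCode → Pre_decodeStringFixed binaryString myCharacters myCode → Spec_decodeStringFixed binaryString myCharacters myCode (decodeStringFixed binaryString myCharacters myCode)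

-- ===== LEMMAS AND PROOFS =====

theorem pvWitness_ok : Dom_decodeStringFixed pvWitness_decodeStringFixed.1 pvWitness_decodeStringFixed.2.1 pvWitness_decodeStringFixed.2.2 ∧ Pre_decodeStringFixed pvWitness_decodeStringFixed.1 pvWitness_decodeStringFixed.2.1 pvWitness_decodeStringFixed.2.2 := by
  constructor <;> decide


-- first value in an association list (what the deduplicating dict build realises)
def firstVal : List (String × String) → String → Option String
  | [], _ => none
  | p :: ps, k => if p.1 = k then some p.2 else firstVal ps k

theorem build_get?_aux (ps : List (String × String)) (k : String) :
    ∀ t : PySem.Dict String String,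
      (ps.foldl (fun table p => if table.contains p.1 then table else table.insert p.1 p.2) t).get? k
        = (t.get? k).or (firstVal ps k) := by
  induction ps with
  | nil => intro t; simp [firstVal]
  | cons p ps ih =>
    intro t
    simp only [List.foldl_cons, firstVal]
    by_cases hc : t.contains p.1
    · rw [if_pos hc, ih]
      by_cases hk : p.1 = k
      · subst hk
        have : (t.get? p.1).isSome := by
          rw [← PySem.Dict.contains_eq_isSome_get?]; exact hc
        cases hg : t.get? p.1 with
        | none => rw [hg] at this; simp at this
        | some w => simp
      · rw [if_neg hk]
    · rw [if_neg hc, ih]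
      by_cases hk : p.1 = k
      · subst hk
        have hg : t.get? p.1 = none := by
          have h2 : (t.get? p.1).isSome = false := by
            rw [← PySem.Dict.contains_eq_isSome_get?]; simpa using hc
          cases hgg : t.get? p.1 with
          | none => rfl
          | some w => rw [hgg] at h2; simp at h2
        rw [PySem.Dict.get?_insert_self, hg, if_pos rfl]
        simp
      · have hkp : k ≠ p.1 := fun h => hk h.symm
        rw [PySem.Dict.get?_insert_of_ne t p.2 hkp, if_neg hk]

theorem build_get? (ps : List (String × String)) (k : String) :
    (bBuild ps).get? k = firstVal ps k := by
  rw [bBuild, build_get?_aux]; simp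

theorem aScan_none (s : List Char) (codes : List String) :
    ∀ i, (∀ j (hj : j < codes.length), i ≤ j → codes[j].toList ≠ s) → aScan s codes i = none := by
  intro i h
  fun_induction aScan s codes i with
  | case1 i hi he => exact absurd he (h i hi (le_refl i))
  | case2 i hi he ih => exact ih (fun j hj hij => h j hj (by omega))
  | case3 i hi => rfl

theorem aScan_shift (s : List Char) (c : String) (codes : List String) :
    ∀ i, aScan s (c :: codes) (i + 1) = (aScan s codes i).map (· + 1) := by
  have key : ∀ n i, codes.length ≤ i + n → aScan s (c :: codes) (i + 1) = (aScan s codes i).map (· + 1) := by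
    intro n
    induction n with
    | zero =>
      intro i hi
      conv_lhs => rw [aScan]
      conv_rhs => rw [aScan]
      rw [dif_neg (by simp; omega), dif_neg (by omega)]
      rfl
    | succ n ihn =>
      intro i hi
      by_cases hlt : i < codes.length
      · conv_lhs => rw [aScan]
        conv_rhs => rw [aScan]
        rw [dif_pos (by simp; omega), dif_pos hlt]
        simp only [List.getElem_cons_succ]
        by_cases he : codes[i].toList = s
        · rw [if_pos he, if_pos he]; rfl
        · rw [if_neg he, if_neg he, ihn (i + 1) (by omega)]
      · conv_lhs => rw [aScan]
        conv_rhs => rw [aScan]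
        rw [dif_neg (by simp; omega), dif_neg hlt]
        rfl
  intro i
  exact key (codes.length) i (by omega)

theorem aScan_cons (s : List Char) (c : String) (codes : List String) :
    aScan s (c :: codes) 0 = if c.toList = s then some 0 else (aScan s codes 0).map (· + 1) := by
  rw [aScan]
  rw [dif_pos (by simp)]
  simp only [List.getElem_cons_zero]
  by_cases he : c.toList = s
  · rw [if_pos he, if_pos he]
  · rw [if_neg he, if_neg he, aScan_shift]

theorem firstVal_zip (s : List Char) :
    ∀ (codes chars : List String),
      (∀ j (hj : j < codes.length), chars.length ≤ j → codes[j].toList ≠ s) →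
      firstVal (codes.zip chars) (String.ofList s) = (aScan s codes 0).map (fun i => chars.getD i "") := by
  intro codes
  induction codes with
  | nil => intro chars h; rw [aScan]; simp [firstVal]
  | cons c codes ih =>
    intro chars h
    cases chars with
    | nil =>
      rw [aScan_none s (c :: codes) 0 (fun j hj _ => h j hj (by simp))]
      simp [firstVal]
    | cons ch chars =>
      simp only [List.zip_cons_cons, firstVal]
      rw [aScan_cons]
      by_cases he : c.toList = s
      · have : c = String.ofList s := by rw [← he, String.ofList_toList]
        rw [if_pos this, if_pos he]
        simp
      · have hne : c ≠ String.ofList s := by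
          intro hh; exact he (by rw [hh, String.toList_ofList])
        rw [if_neg hne, if_neg he]
        rw [ih chars (fun j hj hc => h (j + 1) (by simpa using hj) (by simpa using hc))]
        cases aScan s codes 0 <;> simp

theorem bFind_found (table : PySem.Dict String String) (rest : List Char) (l : Nat) (ch : String)
    (hl : l ≤ rest.length) (hg : table.get? (String.ofList (rest.take l)) = some ch) :
    bFind table rest l = some (ch, l) := by
  rw [bFind, if_pos hl, hg]

theorem bFind_none (table : PySem.Dict String String) (rest : List Char) :
    ∀ l, (∀ j, l ≤ j → j ≤ rest.length → table.get? (String.ofList (rest.take j)) = none) →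
      bFind table rest l = none := by
  intro l h
  fun_induction bFind table rest l with
  | case1 l hl ch hg => rw [h l (le_refl l) hl] at hg; cases hg
  | case2 l hl hg ih => exact ih (fun j hj hjl => h j (by omega) hjl)
  | case3 l hl => rfl

theorem bFind_skip (table : PySem.Dict String String) (rest : List Char) :
    ∀ l m, l ≤ m → m ≤ rest.length + 1 →
      (∀ j, l ≤ j → j < m → table.get? (String.ofList (rest.take j)) = none) →
      bFind table rest l = bFind table rest m := by
  intro l m hlm
  induction m, hlm using Nat.le_induction with
  | base => intro _ _; rfl
  | succ m hlm ih =>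
    intro hm h
    rw [ih (by omega) (fun j hj hjm => h j hj (by omega))]
    rw [bFind, if_pos (by omega), h m hlm (by omega)]

theorem take_app_le {α : Type} (st l2 : List α) (j : Nat) (h : j ≤ st.length) :
    (st ++ l2).take j = st.take j := by
  rw [List.take_append_of_le_length h]

theorem take_app_succ {α : Type} (st : List α) (c : α) (rest : List α) :
    (st ++ c :: rest).take (st.length + 1) = st ++ [c] := by
  rw [List.take_append]
  simp [List.take_of_length_le]

theorem drop_app_succ {α : Type} (st : List α) (c : α) (rest : List α) :
    (st ++ c :: rest).drop (st.length + 1) = rest := by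
  rw [List.drop_append]
  simp

theorem join_toList_aux : ∀ (ss : List String) (acc : String),
    (ss.foldl (· ++ ·) acc).toList = acc.toList ++ ss.flatMap String.toList := by
  intro ss
  induction ss with
  | nil => intro acc; simp
  | cons x ss ih => intro acc; simp [ih, String.toList_append]

theorem join_toList (ss : List String) : (String.join ss).toList = ss.flatMap String.toList := by
  have : String.join ss = ss.foldl (· ++ ·) "" := rfl
  rw [this, join_toList_aux]
  simp

-- main loop correspondence: A's state st_eval is the still-undecoded prefix of the current segment
theorem mainG (myCharacters myCode : List String) (table : PySem.Dict String String) (full : List Char)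
    (hT : ∀ s : List Char, s ≠ [] → s <:+: full →
      table.get? (String.ofList s) = (aScan s myCode 0).map (fun i => myCharacters.getD i "")) :
    ∀ bits st ret, (st ++ bits) <:+ full →
      (∀ j, 1 ≤ j → j ≤ st.length → table.get? (String.ofList (st.take j)) = none) →
      aRun myCharacters myCode bits ret st = ret ++ (bDecode table (st ++ bits)).flatMap String.toList := by
  intro bits
  induction bits with
  | nil =>
    intro st ret hsuf h
    simp only [List.append_nil, aRun]
    cases hst : st with
    | nil => simp [bDecode]
    | cons c st' =>
      have hn : bFind table (c :: st') 1 = none := by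
        apply bFind_none
        intro j hj1 hj2
        rw [← hst]
        exact h j hj1 (by rw [hst]; exact hj2)
      rw [bDecode]
      split
      · next p heq => rw [hn] at heq; cases heq
      · simp
  | cons num rest ih =>
    intro st ret hsuf h
    have hst'ne : st ++ [num] ≠ [] := by simp
    have hinf : (st ++ [num]) <:+: full := by
      have hpre : (st ++ [num]) <+: (st ++ num :: rest) := ⟨rest, by simp⟩
      exact hpre.isInfix.trans hsuf.isInfix
    have hTs := hT (st ++ [num]) hst'ne hinf
    have hrest_suf : rest <:+ full := by
      refine List.IsSuffix.trans ?_ hsuf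
      exact ⟨st ++ [num], by simp⟩
    simp only [aRun]
    split
    · next i heq =>
      have hget : table.get? (String.ofList (st ++ [num])) = some (myCharacters.getD i "") := by
        rw [hTs, heq]; rfl
      have hfind : bFind table (st ++ num :: rest) 1
          = some (myCharacters.getD i "", st.length + 1) := by
        rw [bFind_skip table (st ++ num :: rest) 1 (st.length + 1) (by omega)
          (by simp) (fun j hj1 hj2 => by
            rw [take_app_le _ _ j (by omega)]
            exact h j hj1 (by omega))]
        exact bFind_found _ _ _ _ (by simp) (by rw [take_app_succ]; exact hget)
      obtain ⟨c, t, hct⟩ : ∃ c t, st ++ num :: rest = c :: t := by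
        cases st with
        | nil => exact ⟨num, rest, rfl⟩
        | cons a s => exact ⟨a, s ++ num :: rest, rfl⟩
      rw [hct, bDecode]
      split
      · next p heq2 =>
        rw [← hct, hfind] at heq2
        cases heq2
        rw [← hct, drop_app_succ]
        rw [ih [] (ret ++ (myCharacters.getD i "").toList) (by simpa using hrest_suf)
          (by intro j h1 h2; simp at h2; omega)]
        simp
      · next heq2 =>
        rw [← hct, hfind] at heq2
        cases heq2
    · next heq =>
      have hget : table.get? (String.ofList (st ++ [num])) = none := by
        rw [hTs, heq]; rfl
      have h' : ∀ j, 1 ≤ j → j ≤ (st ++ [num]).length →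
          table.get? (String.ofList ((st ++ [num]).take j)) = none := by
        intro j hj1 hj2
        simp only [List.length_append, List.length_cons, List.length_nil] at hj2
        by_cases hle : j ≤ st.length
        · rw [take_app_le _ _ j hle]
          exact h j hj1 hle
        · have hj : j = st.length + 1 := by omega
          rw [hj, List.take_of_length_le (by simp)]
          exact hget
      rw [ih (st ++ [num]) ret (by simpa using hsuf) h']
      simp

-- ===== VERDICT (by name: the statement is the Claim_ definition above) =====
theorem decodeStringFixed_spec : Claim_equal_decodeStringFixed := by
  intro binaryString myCharacters myCode _ hpre
  unfold Spec_decodeStringFixed decodeStringFixed decodeStringFixed_alt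
  have hT : ∀ s : List Char, s ≠ [] → s <:+: binaryString.toList →
      (bBuild (myCode.zip myCharacters)).get? (String.ofList s)
        = (aScan s myCode 0).map (fun i => myCharacters.getD i "") := by
    intro s hne hinf
    rw [build_get?, firstVal_zip]
    intro j hj hc hcontra
    have hmem : myCode[j] ∈ myCode.drop myCharacters.length := by
      have hlt : j - myCharacters.length < (myCode.drop myCharacters.length).length := by
        simp only [List.length_drop]; omega
      have hget : (myCode.drop myCharacters.length)[j - myCharacters.length] = myCode[j] := by
        rw [List.getElem_drop]; congr 1; omega
      rw [← hget]; exact List.getElem_mem hlt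
    rcases hpre _ hmem with h0 | h0
    · rw [hcontra] at h0; exact hne h0
    · rw [hcontra] at h0; exact h0 hinf
  have := mainG myCharacters myCode (bBuild (myCode.zip myCharacters)) binaryString.toList hT
    binaryString.toList [] [] (by simp) (by intro j h1 h2; simp at h2; omega)
  simp only [List.nil_append] at this
  rw [this]
  conv_rhs => rw [← String.ofList_toList (s := String.join _)]
  rw [join_toList]
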